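-- pv_equiv track=rewrite | github.com/grcdeepak1/codepath_ib | week6/subMatrixZero.py | solve
-- ===== SOURCE A (Python) =====
-- def solve(A):
--     rows = len(A)
--     cols = len(A[0])
--     if rows == 0 or cols == 0:
--         return 0
--
--     sum_matrix = [[0 for i in range(cols+1)] for j in range(rows + 1)]
--     result = 0
--
--     for i in range(1, rows + 1):
--         for j in range(1, cols + 1):
--             sum_matrix[i][j] = A[i-1][j-1] + sum_matrix[i-1][j] + sum_matrix[i][j-1] - sum_matrix[i-1][j-1]
--
--     for  i in range(rows):
--         for j in range(i+1, rows + 1):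
--             counti = {}
--             counti[0] = 1
--             for k in range(1, cols + 1):
--                 val = sum_matrix[j][k] - sum_matrix[i][k]
--                 if val in counti:
--                     result = result + counti[val]
--                     counti[val] = counti[val] + 1
--                 else:
--                     counti[val] = 1
--
--     return result;
-- ===== SOURCE B (Python) =====
-- def solve(A):
--     cols = len(A[0])
--     rows = len(A)
--     result = 0
--     for i in range(rows):
--         ps = [0] * (cols + 1)
--         for j in range(i, rows):
--             row = A[j]
--             acc = 0
--             nxt = [0]
--             for c in range(cols):
--                 acc += row[c]
--                 nxt.append(ps[c + 1] + acc)
--             ps = nxt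
--             # zero-sum column ranges of the band = equal pairs among its prefix
--             # sums: sort them and count pairs inside equal runs.
--             s = sorted(ps)
--             prev = s[0]
--             streak = 0
--             for v in s[1:]:
--                 if v == prev:
--                     streak += 1
--                 else:
--                     streak = 0
--                 result += streak
--                 prev = v
--     return result
-- ===== Notes on version B (the rewrite author's own statement) =====
-- stated objective: alternative
-- what changed: Replaced A's 2D prefix-sum matrix and per-band hash-map counting of seen prefix sums by an incrementally grown band prefix-sum list whose equal pairs are counted by sorting it and summing run lengths (no dict at all).
import Mathlib
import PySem

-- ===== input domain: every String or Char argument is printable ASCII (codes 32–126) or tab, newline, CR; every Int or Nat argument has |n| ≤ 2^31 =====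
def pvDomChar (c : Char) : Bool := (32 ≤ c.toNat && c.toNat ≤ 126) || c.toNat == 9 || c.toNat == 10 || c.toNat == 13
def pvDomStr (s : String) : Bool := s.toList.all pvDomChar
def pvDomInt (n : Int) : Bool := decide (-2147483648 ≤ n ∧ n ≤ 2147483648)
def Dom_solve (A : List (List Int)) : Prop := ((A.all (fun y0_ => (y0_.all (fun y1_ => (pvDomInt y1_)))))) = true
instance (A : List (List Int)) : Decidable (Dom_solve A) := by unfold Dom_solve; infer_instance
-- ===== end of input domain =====

-- B replaces A's 2D-prefix-matrix + per-band hash-counter by an incrementally grown band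
-- prefix-sum list whose equal pairs are counted by SORTING it and summing run lengths —
-- no dict at all (alternative algorithm, return-value equivalence only).

-- ===== PORT A =====
-- all indices below are in range on every admitted input, so List.getD/List.set are exact
def pvGet2 (m : List (List Int)) (i k : Nat) : Int := (m.getD i []).getD k 0
def pvSet2 (m : List (List Int)) (i k : Nat) (v : Int) : List (List Int) :=
  m.set i ((m.getD i []).set k v)
def pvGetA (A : List (List Int)) (i j : Nat) : Int := (A.getD i []).getD j 0

-- one step of A's counter loop: `if val in counti: …` on (result, counti)
def pvCountStepA (st : Int × PySem.Dict Int Int) (val : Int) : Int × PySem.Dict Int Int :=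
  match st.2.get? val with
  | some c => (st.1 + c, st.2.insert val (c + 1))
  | none => (st.1, st.2.insert val 1)

def solve (A : List (List Int)) : Int :=
  let rows := A.length
  let cols := (A.getD 0 []).length
  if rows = 0 ∨ cols = 0 then 0 else
    -- first nested loop: build the 2D prefix matrix by in-place assignment
    let sm := (List.range' 1 rows).foldl (fun m i =>
        (List.range' 1 cols).foldl (fun m' j =>
          pvSet2 m' i j (pvGetA A (i-1) (j-1) + pvGet2 m' (i-1) j + pvGet2 m' i (j-1)
                          - pvGet2 m' (i-1) (j-1))) m)
      (List.replicate (rows+1) (List.replicate (cols+1) (0:Int)))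
    -- second nested loop: for each row pair, the counter scan over columns
    (List.range rows).foldl (fun res i =>
        (List.range' (i+1) (rows - i)).foldl (fun r j =>
          ((List.range' 1 cols).foldl
            (fun st k => pvCountStepA st (pvGet2 sm j k - pvGet2 sm i k))
            (r, (PySem.Dict.empty (κ := Int) (ν := Int)).insert 0 1)).1) res) 0

-- ===== PORT B =====
-- `acc += row[c]; nxt.append(ps[c+1] + acc)` on state (acc, nxt)
def pvBuildStep (row ps : List Int) (st : Int × List Int) (c : Nat) : Int × List Int :=
  (st.1 + row.getD c 0, st.2 ++ [ps.getD (c+1) 0 + (st.1 + row.getD c 0)])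

-- `if v == prev: streak += 1 else: streak = 0; result += streak; prev = v` on (prev, streak, result)
def pvScanStep (st : Int × Int × Int) (v : Int) : Int × Int × Int :=
  if v = st.1 then (v, st.2.1 + 1, st.2.2 + (st.2.1 + 1)) else (v, 0, st.2.2)

def solve_alt (A : List (List Int)) : Int :=
  let cols := (A.getD 0 []).length
  let rows := A.length
  (List.range rows).foldl (fun res i =>
    ((List.range' i (rows - i)).foldl (fun (st : List Int × Int) j =>
        let ps := ((List.range cols).foldl (pvBuildStep (A.getD j []) st.1) (0, [(0:Int)])).2
        let s := PySem.List.sorted ps (fun x => x) false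
        -- `s[1:]` is `s.drop 1` (slice with non-negative start, to end); `s[0]` is in range
        (ps, ((s.drop 1).foldl pvScanStep (s.getD 0 0, 0, st.2)).2.2))
      (List.replicate (cols+1) 0, res)).2) 0

-- ===== PRECONDITION & SPEC =====
-- Pre_ excludes exactly the inputs where Python A raises IndexError: the empty list
-- (len(A[0])) and ragged inputs with some row shorter than the first row.
def Pre_solve (A : List (List Int)) : Prop :=
  A ≠ [] ∧ ∀ r ∈ A, (A.headD []).length ≤ r.length
instance (A : List (List Int)) : Decidable (Pre_solve A) := by unfold Pre_solve; infer_instance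
def pvWitness_solve : List (List Int) := [[1, -1], [2, 3]]
def Spec_solve (A : List (List Int)) (out : Int) : Prop := out = solve_alt A
instance (A : List (List Int)) (out : Int) : Decidable (Spec_solve A out) := by unfold Spec_solve; infer_instance

-- ===== CLAIM (what is proved, stated in full; the proofs are below) =====
def Claim_equal_solve : Prop := ∀ (A : List (List Int)), Dom_solve A → Pre_solve A → Spec_solve A (solve A)

-- ===== LEMMAS AND PROOFS =====
-- proof-side abbreviations and characterisations

-- row-prefix and 2D-prefix sums of A
def pvR (A : List (List Int)) (r k : Nat) : Int := ((List.range k).map (fun c => pvGetA A r c)).sum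
def pvP (A : List (List Int)) (i k : Nat) : Int := ((List.range i).map (fun r => pvR A r k)).sum
def pvPrefRow (A : List (List Int)) (cols i : Nat) : List Int :=
  (List.range (cols+1)).map (fun k => pvP A i k)
def pvPartRow (A : List (List Int)) (cols i J : Nat) : List Int :=
  (List.range (cols+1)).map (fun k => if k ≤ J then pvP A i k else 0)
def pvMatW (A : List (List Int)) (rows cols i : Nat) (row : List Int) : List (List Int) :=
  (List.range i).map (pvPrefRow A cols) ++ row :: List.replicate (rows - i) (List.replicate (cols+1) (0:Int))
def pvMatSt (A : List (List Int)) (rows cols I : Nat) : List (List Int) :=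
  (List.range (I+1)).map (pvPrefRow A cols) ++ List.replicate (rows - I) (List.replicate (cols+1) (0:Int))
def pvD0 : PySem.Dict Int Int := (PySem.Dict.empty).insert 0 1
def pvStepA (sm : List (List Int)) (cols i : Nat) (r : Int) (j : Nat) : Int :=
  ((List.range' 1 cols).foldl (fun st k => pvCountStepA st (pvGet2 sm j k - pvGet2 sm i k)) (r, pvD0)).1
def pvStepP (A : List (List Int)) (cols i : Nat) (r : Int) (j : Nat) : Int :=
  ((List.range' 1 cols).foldl (fun st k => pvCountStepA st (pvP A j k - pvP A i k)) (r, pvD0)).1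

-- the band prefix-sum list of rows [i, j) (k = 0 .. cols)
def pvPS (A : List (List Int)) (cols i j : Nat) : List Int :=
  (List.range (cols+1)).map (fun k => pvP A j k - pvP A i k)

-- number of equal (unordered) pairs in a list
def pvPairs : List Int → Nat
  | [] => 0
  | x :: t => t.count x + pvPairs t

-- A's result increments, processing L with `seen` = multiset of P
def pvPairsInc : List Int → List Int → Nat
  | _, [] => 0
  | P, v :: t => P.count v + pvPairsInc (P ++ [v]) t

-- B's per-band step, named
def pvStepB (A : List (List Int)) (cols : Nat) (st : List Int × Int) (j : Nat) : List Int × Int :=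
  let ps := ((List.range cols).foldl (pvBuildStep (A.getD j []) st.1) (0, [(0:Int)])).2
  let s := PySem.List.sorted ps (fun x => x) false
  (ps, ((s.drop 1).foldl pvScanStep (s.getD 0 0, 0, st.2)).2.2)

-- generic getD / set helpers
theorem getD_mapRange {α : Type} (f : Nat → α) (d : α) {n r : Nat} (h : r < n) :
    ((List.range n).map f).getD r d = f r := by
  simp [List.getD_eq_getElem?_getD, List.getElem?_map, List.getElem?_range h]

theorem getD_append_left {α : Type} {xs ys : List α} {r : Nat} (d : α) (h : r < xs.length) :
    (xs ++ ys).getD r d = xs.getD r d := by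
  simp [List.getD_eq_getElem?_getD, List.getElem?_append_left h]

theorem getD_append_cons_self {α : Type} (xs : List α) (y : α) (zs : List α) (d : α) :
    (xs ++ y :: zs).getD xs.length d = y := by
  simp [List.getD_eq_getElem?_getD]

theorem set_append_cons_self {α : Type} (xs : List α) (y : α) (zs : List α) (v : α) :
    (xs ++ y :: zs).set xs.length v = xs ++ v :: zs := by
  induction xs with
  | nil => simp
  | cons a t ih => simp [ih]

-- reads and writes on the structured matrix
theorem matW_row_self (A : List (List Int)) (rows cols i : Nat) (row : List Int) :
    (pvMatW A rows cols i row).getD i [] = row := by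
  unfold pvMatW
  have h := getD_append_cons_self ((List.range i).map (pvPrefRow A cols)) row
    (List.replicate (rows - i) (List.replicate (cols+1) (0:Int))) ([] : List Int)
  simpa using h

theorem get2_matW_lt (A : List (List Int)) (rows cols i : Nat) (row : List Int) {r k : Nat}
    (hr : r < i) (hk : k ≤ cols) :
    pvGet2 (pvMatW A rows cols i row) r k = pvP A r k := by
  unfold pvGet2 pvMatW
  rw [getD_append_left _ (by simpa using hr), getD_mapRange _ _ hr]
  unfold pvPrefRow
  rw [getD_mapRange _ _ (by omega)]

theorem get2_matW_self (A : List (List Int)) (rows cols i : Nat) (row : List Int) (k : Nat) :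
    pvGet2 (pvMatW A rows cols i row) i k = row.getD k 0 := by
  unfold pvGet2
  rw [matW_row_self]

theorem set2_matW (A : List (List Int)) (rows cols i : Nat) (row : List Int) (j : Nat) (v : Int) :
    pvSet2 (pvMatW A rows cols i row) i j v = pvMatW A rows cols i (row.set j v) := by
  unfold pvSet2
  rw [matW_row_self]
  unfold pvMatW
  have h := set_append_cons_self ((List.range i).map (pvPrefRow A cols)) row
    (List.replicate (rows - i) (List.replicate (cols+1) (0:Int))) (row.set j v)
  simpa using h

-- arithmetic facts about the prefix sums
theorem pvP_zero (A : List (List Int)) (i : Nat) : pvP A i 0 = 0 := by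
  simp [pvP, pvR]

theorem pvP_succ (A : List (List Int)) (i k : Nat) : pvP A (i+1) k = pvP A i k + pvR A i k := by
  simp [pvP, List.range_succ]

theorem pvR_succ (A : List (List Int)) (r k : Nat) : pvR A r (k+1) = pvR A r k + pvGetA A r k := by
  simp [pvR, List.range_succ]

theorem pvP_recurrence (A : List (List Int)) {i : Nat} (J : Nat) (h1 : 1 ≤ i) :
    pvGetA A (i-1) J + pvP A (i-1) (J+1) + pvP A i J - pvP A (i-1) J = pvP A i (J+1) := by
  obtain ⟨i', rfl⟩ : ∃ i', i = i' + 1 := ⟨i - 1, by omega⟩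
  simp only [Nat.add_sub_cancel, pvP_succ, pvR_succ]
  ring

-- the partial row
theorem partRow_zero (A : List (List Int)) (cols i : Nat) :
    pvPartRow A cols i 0 = List.replicate (cols+1) (0:Int) := by
  unfold pvPartRow
  apply List.ext_getElem (by simp)
  intro t h1 h2
  simp only [List.getElem_map, List.getElem_range, List.getElem_replicate]
  split
  · next h => interval_cases t; exact pvP_zero A i
  · rfl

theorem partRow_full (A : List (List Int)) (cols i : Nat) :
    pvPartRow A cols i cols = pvPrefRow A cols i := by
  unfold pvPartRow pvPrefRow
  apply List.map_congr_left
  intro k hk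
  rw [if_pos (by simpa using Nat.lt_succ_iff.mp (List.mem_range.mp hk))]

theorem partRow_set (A : List (List Int)) (cols i J : Nat) :
    (pvPartRow A cols i J).set (J+1) (pvP A i (J+1)) = pvPartRow A cols i (J+1) := by
  unfold pvPartRow
  apply List.ext_getElem (by simp)
  intro t h1 h2
  simp only [List.length_set, List.length_map, List.length_range] at h1 h2
  rw [List.getElem_set]
  simp only [List.getElem_map, List.getElem_range]
  by_cases ht : J + 1 = t
  · subst ht; rw [if_pos rfl, if_pos (le_refl _)]
  · rw [if_neg ht]
    by_cases h2' : t ≤ J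
    · rw [if_pos h2', if_pos (by omega)]
    · rw [if_neg h2', if_neg (by omega)]

theorem partRow_getD (A : List (List Int)) (cols i J k : Nat) (hk : k ≤ cols) :
    (pvPartRow A cols i J).getD k 0 = if k ≤ J then pvP A i k else 0 := by
  unfold pvPartRow
  rw [getD_mapRange _ _ (by omega)]
-- the first nested loop builds the prefix matrix
theorem innerLoop (A : List (List Int)) (rows cols i : Nat) (h1 : 1 ≤ i) :
    ∀ (m J : Nat), J + m ≤ cols →
    (List.range' (J+1) m).foldl (fun m' j =>
        pvSet2 m' i j (pvGetA A (i-1) (j-1) + pvGet2 m' (i-1) j + pvGet2 m' i (j-1)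
                        - pvGet2 m' (i-1) (j-1)))
      (pvMatW A rows cols i (pvPartRow A cols i J))
    = pvMatW A rows cols i (pvPartRow A cols i (J+m)) := by
  intro m
  induction m with
  | zero => intro J h; simp
  | succ m ih =>
    intro J h
    have hidx : J + (m+1) = (J+1) + m := by omega
    rw [hidx, List.range'_succ, List.foldl_cons]
    have hsub : (J+1) - 1 = J := rfl
    rw [hsub]
    rw [get2_matW_lt A rows cols i _ (by omega) (by omega)]
    rw [get2_matW_self A rows cols i _ J]
    rw [partRow_getD A cols i J J (by omega), if_pos (le_refl J)]
    rw [get2_matW_lt A rows cols i _ (by omega) (by omega)]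
    rw [set2_matW]
    rw [pvP_recurrence A J h1]
    rw [partRow_set A cols i J]
    exact ih (J+1) (by omega)

-- the outer loop of the first phase
theorem outerLoop (A : List (List Int)) (rows cols : Nat) :
    ∀ (n I : Nat), I + n ≤ rows →
    (List.range' (I+1) n).foldl (fun m i =>
        (List.range' 1 cols).foldl (fun m' j =>
          pvSet2 m' i j (pvGetA A (i-1) (j-1) + pvGet2 m' (i-1) j + pvGet2 m' i (j-1)
                          - pvGet2 m' (i-1) (j-1))) m)
      (pvMatSt A rows cols I)
    = pvMatSt A rows cols (I+n) := by
  intro n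
  induction n with
  | zero => intro I h; simp
  | succ n ih =>
    intro I h
    rw [List.range'_succ, List.foldl_cons]
    have hMW : pvMatSt A rows cols I = pvMatW A rows cols (I+1) (pvPartRow A cols (I+1) 0) := by
      rw [partRow_zero]
      unfold pvMatSt pvMatW
      rw [show rows - I = (rows - (I+1)) + 1 by omega, List.replicate_succ]
    rw [hMW]
    have hin := innerLoop A rows cols (I+1) (by omega) cols 0 (by omega)
    simp only [Nat.zero_add] at hin
    rw [hin, partRow_full]
    have hMS : pvMatW A rows cols (I+1) (pvPrefRow A cols (I+1)) = pvMatSt A rows cols (I+1) := by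
      unfold pvMatW pvMatSt
      simp [List.range_succ]
    rw [hMS]
    have hidx : I + (n+1) = (I+1) + n := by omega
    rw [hidx]
    exact ih (I+1) (by omega)

theorem sm_eq (A : List (List Int)) (rows cols : Nat) :
    (List.range' 1 rows).foldl (fun m i =>
        (List.range' 1 cols).foldl (fun m' j =>
          pvSet2 m' i j (pvGetA A (i-1) (j-1) + pvGet2 m' (i-1) j + pvGet2 m' i (j-1)
                          - pvGet2 m' (i-1) (j-1))) m)
      (List.replicate (rows+1) (List.replicate (cols+1) (0:Int)))
    = (List.range (rows+1)).map (pvPrefRow A cols) := by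
  have h0 : List.replicate (rows+1) (List.replicate (cols+1) (0:Int)) = pvMatSt A rows cols 0 := by
    unfold pvMatSt
    have : pvPrefRow A cols 0 = List.replicate (cols+1) (0:Int) := by
      unfold pvPrefRow
      apply List.ext_getElem (by simp)
      intro t h1 h2
      simp [pvP]
    simp [this, List.replicate_succ]
  rw [h0]
  have := outerLoop A rows cols rows 0 (by omega)
  simp only [Nat.zero_add] at this
  rw [this]
  unfold pvMatSt
  simp

theorem get2_sm (A : List (List Int)) (rows cols : Nat) {i k : Nat} (hi : i ≤ rows) (hk : k ≤ cols) :
    pvGet2 ((List.range (rows+1)).map (pvPrefRow A cols)) i k = pvP A i k := by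
  unfold pvGet2
  rw [getD_mapRange _ _ (by omega)]
  unfold pvPrefRow
  rw [getD_mapRange _ _ (by omega)]

theorem stepA_eq_stepP (A : List (List Int)) (rows cols i : Nat) (hi : i ≤ rows) {j : Nat}
    (hj : j ≤ rows) (r : Int) :
    pvStepA ((List.range (rows+1)).map (pvPrefRow A cols)) cols i r j = pvStepP A cols i r j := by
  unfold pvStepA pvStepP
  congr 1
  apply PySem.List.foldl_congr_mem
  intro st k hk
  have hk' := List.mem_range'_1.mp hk
  rw [get2_sm A rows cols hj (by omega), get2_sm A rows cols hi (by omega)]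

-- ===== counting: equal pairs =====
theorem pairs_append_singleton (L : List Int) (v : Int) :
    pvPairs (L ++ [v]) = pvPairs L + L.count v := by
  induction L with
  | nil => simp [pvPairs]
  | cons x t ih =>
    simp only [List.cons_append, pvPairs, ih, List.count_append, List.count_cons,
      List.count_singleton, List.count_nil]
    by_cases h : x = v
    · subst h; simp; omega
    · simp [h, Ne.symm h]; omega

theorem pairs_perm {l₁ l₂ : List Int} (h : l₁.Perm l₂) : pvPairs l₁ = pvPairs l₂ := by
  induction h with
  | nil => rfl
  | cons x h ih => simp [pvPairs, ih, h.count_eq]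
  | swap x y l =>
    simp only [pvPairs, List.count_cons]
    by_cases h : x = y
    · subst h; omega
    · simp [h, Ne.symm h]; omega
  | trans _ _ ih1 ih2 => exact ih1.trans ih2

theorem pairsInc_eq : ∀ (L P : List Int), pvPairsInc P L + pvPairs P = pvPairs (P ++ L) := by
  intro L
  induction L with
  | nil => intro P; simp [pvPairsInc]
  | cons v t ih =>
    intro P
    have h := ih (P ++ [v])
    rw [pairs_append_singleton] at h
    simp only [pvPairsInc]
    have : (P ++ [v]) ++ t = P ++ v :: t := by simp
    rw [this] at h
    omega

-- A's dict fold counts the equal pairs added by L, given `d` = multiset of P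
theorem countA_fold : ∀ (L : List Int) (res : Int) (d : PySem.Dict Int Int) (P : List Int),
    (∀ v : Int, d.get? v = if P.count v = 0 then none else some ((P.count v : Int))) →
    (L.foldl pvCountStepA (res, d)).1 = res + (pvPairsInc P L : Int) := by
  intro L
  induction L with
  | nil => intro res d P h; simp [pvPairsInc]
  | cons v t ih =>
    intro res d P h
    rw [List.foldl_cons]
    by_cases h0 : P.count v = 0
    · have hstep : pvCountStepA (res, d) v = (res, d.insert v 1) := by
        simp [pvCountStepA, h v, h0]
      rw [hstep, ih res _ (P ++ [v])]
      · simp [pvPairsInc, h0]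
      · intro w
        rw [PySem.Dict.get?_insert]
        by_cases hw : w = v
        · subst hw; simp [List.count_append, h0]
        · simp [hw, h w, List.count_append, List.count_singleton, Ne.symm hw]
    · have hstep : pvCountStepA (res, d) v = (res + (P.count v : Int), d.insert v ((P.count v : Int) + 1)) := by
        simp [pvCountStepA, h v, h0]
      rw [hstep, ih _ _ (P ++ [v])]
      · simp only [pvPairsInc]
        push_cast
        ring
      · intro w
        rw [PySem.Dict.get?_insert]
        by_cases hw : w = v
        · subst hw
          simp [List.count_append]
        · simp [hw, h w, List.count_append, List.count_singleton, Ne.symm hw]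

-- the band prefix list is 0 followed by A's inner-loop values
theorem pvPS_cons (A : List (List Int)) (cols i j : Nat) :
    pvPS A cols i j = 0 :: (List.range' 1 cols).map (fun k => pvP A j k - pvP A i k) := by
  unfold pvPS
  rw [List.range_succ_eq_map, List.map_cons, List.range'_eq_map_range, List.map_map, List.map_map]
  congr 1
  · simp [pvP_zero]
  · apply List.map_congr_left
    intro k _
    simp [Function.comp, Nat.succ_eq_add_one, Nat.add_comm]

-- A's per-band step equals res + (equal pairs of the band prefix list)
theorem stepP_pairs (A : List (List Int)) (cols i : Nat) (r : Int) (j : Nat) :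
    pvStepP A cols i r j = r + (pvPairs (pvPS A cols i j) : Int) := by
  unfold pvStepP
  have hm : (List.range' 1 cols).foldl
      (fun st k => pvCountStepA st (pvP A j k - pvP A i k)) (r, pvD0)
      = ((List.range' 1 cols).map (fun k => pvP A j k - pvP A i k)).foldl
          pvCountStepA (r, pvD0) := by
    rw [List.foldl_map]
  rw [hm, countA_fold _ r pvD0 [0]]
  · have := pairsInc_eq ((List.range' 1 cols).map (fun k => pvP A j k - pvP A i k)) [0]
    have hp0 : pvPairs [0] = 0 := by simp [pvPairs]
    rw [hp0] at this
    rw [pvPS_cons]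
    have : pvPairsInc [0] ((List.range' 1 cols).map (fun k => pvP A j k - pvP A i k))
        = pvPairs ((0:Int) :: (List.range' 1 cols).map (fun k => pvP A j k - pvP A i k)) := by
      simpa using this
    rw [this]
  · intro v
    unfold pvD0
    rw [PySem.Dict.get?_insert]
    by_cases hv : v = 0
    · subst hv; simp
    · simp [hv, PySem.Dict.get?_empty, Ne.symm hv]

-- ===== B-side =====
-- the inner build loop grows the band prefix list by one row
theorem build_partial (A : List (List Int)) (cols i j : Nat) : ∀ c ≤ cols,
    (List.range c).foldl (pvBuildStep (A.getD j []) (pvPS A cols i j)) (0, [(0:Int)])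
      = (pvR A j c, (List.range (c+1)).map (fun k => pvP A (j+1) k - pvP A i k)) := by
  intro c
  induction c with
  | zero =>
    intro _
    simp [pvR, pvP_zero]
  | succ c ih =>
    intro hc
    rw [List.range_succ, List.foldl_append, ih (by omega), List.foldl_cons, List.foldl_nil]
    unfold pvBuildStep
    have hrow : (A.getD j []).getD c 0 = pvGetA A j c := rfl
    have hps : (pvPS A cols i j).getD (c+1) 0 = pvP A j (c+1) - pvP A i (c+1) := by
      unfold pvPS
      rw [getD_mapRange _ _ (by omega)]
    simp only [hrow, hps]
    simp only [Prod.mk.injEq]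
    refine ⟨?_, ?_⟩
    · rw [pvR_succ]
    · rw [List.range_succ (n := c+1), List.map_append, List.map_singleton]
      congr 1
      have : pvP A j (c+1) - pvP A i (c+1) + (pvR A j c + pvGetA A j c)
          = pvP A (j+1) (c+1) - pvP A i (c+1) := by
        rw [pvP_succ, pvR_succ]; ring
      rw [this]

theorem build_eq (A : List (List Int)) (cols i j : Nat) :
    ((List.range cols).foldl (pvBuildStep (A.getD j []) (pvPS A cols i j)) (0, [(0:Int)])).2
      = pvPS A cols i (j+1) := by
  rw [build_partial A cols i j cols (le_refl _)]
  rfl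

-- the sorted streak scan counts the equal pairs of the rest
theorem scan_count : ∀ (rest : List Int) (prev streak res : Int),
    rest.Pairwise (· ≤ ·) → (∀ y ∈ rest, prev ≤ y) →
    (rest.foldl pvScanStep (prev, streak, res)).2.2
      = res + (streak + 1) * (rest.count prev : Int) + (pvPairs rest : Int) := by
  intro rest
  induction rest with
  | nil => intro prev streak res _ _; simp [pvPairs]
  | cons v t ih =>
    intro prev streak res hpw hle
    rw [List.foldl_cons]
    have hpw' := (List.pairwise_cons.mp hpw).2
    have hvle := (List.pairwise_cons.mp hpw).1
    by_cases hv : v = prev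
    · subst hv
      have hstep : pvScanStep (v, streak, res) v = (v, streak + 1, res + (streak + 1)) := by
        simp [pvScanStep]
      rw [hstep, ih v (streak+1) _ hpw' hvle]
      simp only [pvPairs, List.count_cons_self]
      push_cast
      ring
    · have hstep : pvScanStep (prev, streak, res) v = (v, 0, res) := by
        simp [pvScanStep, hv]
      rw [hstep, ih v 0 res hpw' hvle]
      have hlt : prev < v := lt_of_le_of_ne (hle v (List.mem_cons_self)) (Ne.symm hv)
      have hct : t.count prev = 0 := by
        rw [List.count_eq_zero]
        intro hmem
        exact absurd (lt_of_lt_of_le hlt (hvle prev hmem)) (lt_irrefl prev)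
      have hcv : (v :: t).count prev = 0 := by
        rw [List.count_cons, hct]
        simp [hv, Ne.symm hv]
      rw [hcv]
      simp only [pvPairs]
      push_cast
      ring

-- B's per-band step: new band prefix list, result += equal pairs of it
theorem stepB_eq (A : List (List Int)) (cols i j : Nat) (res : Int) :
    pvStepB A cols (pvPS A cols i j, res) j
      = (pvPS A cols i (j+1), res + (pvPairs (pvPS A cols i (j+1)) : Int)) := by
  unfold pvStepB
  rw [build_eq]
  simp only
  congr 1
  have hne : pvPS A cols i (j+1) ≠ [] := by
    unfold pvPS
    simp
  have hsne : PySem.List.sorted (pvPS A cols i (j+1)) (fun x => x) false ≠ [] := by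
    rw [Ne, PySem.List.sorted_eq_nil_iff]
    exact hne
  obtain ⟨x, tl, hs⟩ : ∃ x tl, PySem.List.sorted (pvPS A cols i (j+1)) (fun x => x) false = x :: tl := by
    cases h : PySem.List.sorted (pvPS A cols i (j+1)) (fun x => x) false with
    | nil => exact absurd h hsne
    | cons a b => exact ⟨a, b, rfl⟩
  rw [hs]
  have hpw : (x :: tl).Pairwise (fun a b => a ≤ b) := by
    have := PySem.List.sorted_pairwise (xs := pvPS A cols i (j+1)) (key := fun x => x)
    rw [hs] at this
    exact this
  have hsc := scan_count tl x 0 res (List.pairwise_cons.mp hpw).2 (List.pairwise_cons.mp hpw).1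
  have hget : ((x :: tl).getD 0 0 : Int) = x := rfl
  have hdrop : (x :: tl).drop 1 = tl := rfl
  rw [hdrop, hget, hsc]
  have hperm : (x :: tl).Perm (pvPS A cols i (j+1)) := by
    have := PySem.List.sorted_perm (xs := pvPS A cols i (j+1)) (key := fun x => x) (rev := false)
    rw [hs] at this
    exact this
  rw [← pairs_perm hperm]
  simp only [pvPairs]
  push_cast
  ring

-- aligning B's inner fold (loop var = top of next row) with the sum over bottom indices
theorem alignB (A : List (List Int)) (cols : Nat) : ∀ (n i m : Nat) (res : Int),
    ((List.range' (i+m) n).foldl (pvStepB A cols) (pvPS A cols i (i+m), res)).2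
      = (List.range' (i+m+1) n).foldl (fun r j => r + (pvPairs (pvPS A cols i j) : Int)) res := by
  intro n
  induction n with
  | zero => intro i m res; rfl
  | succ n ih =>
    intro i m res
    rw [List.range'_succ, List.range'_succ, List.foldl_cons, List.foldl_cons]
    rw [stepB_eq]
    have := ih i (m+1) (res + (pvPairs (pvPS A cols i (i+m+1)) : Int))
    simpa [Nat.add_assoc] using this

theorem pvPS_self (A : List (List Int)) (cols i : Nat) :
    pvPS A cols i i = List.replicate (cols+1) 0 := by
  unfold pvPS
  apply List.ext_getElem (by simp)
  intro t h1 h2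
  simp

-- solve_alt as a sum of band pair counts
theorem alt_eq_sum (A : List (List Int)) :
    solve_alt A = (List.range A.length).foldl (fun res i =>
      (List.range' (i+1) (A.length - i)).foldl
        (fun r j => r + (pvPairs (pvPS A (A.getD 0 []).length i j) : Int)) res) 0 := by
  show (List.range A.length).foldl (fun res i =>
      ((List.range' i (A.length - i)).foldl (pvStepB A (A.getD 0 []).length)
        (List.replicate ((A.getD 0 []).length + 1) 0, res)).2) 0 = _
  apply PySem.List.foldl_congr_mem
  intro res i _
  rw [← pvPS_self A (A.getD 0 []).length i]
  have := alignB A (A.getD 0 []).length (A.length - i) i 0 res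
  simpa using this

theorem foldl_id_int {α : Type} (z : Int) : ∀ (l : List α), l.foldl (fun res _ => res) z = z := by
  intro l
  induction l with
  | nil => rfl
  | cons a t ih => rw [List.foldl_cons]; exact ih

theorem solve_eq_alt (A : List (List Int)) : solve A = solve_alt A := by
  rw [alt_eq_sum]
  by_cases h0 : A.length = 0 ∨ (A.getD 0 []).length = 0
  · have hz : ∀ (res : Int) (i : Nat),
        (List.range' (i+1) (A.length - i)).foldl
          (fun r j => r + (pvPairs (pvPS A (A.getD 0 []).length i j) : Int)) res = res := by
      intro res i
      rcases h0 with h | h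
      · rw [h]; simp
      · have hps : ∀ j, pvPairs (pvPS A (A.getD 0 []).length i j) = 0 := by
          intro j
          rw [h]
          show pvPairs ((List.range 1).map _) = 0
          simp [pvPairs]
        calc (List.range' (i+1) (A.length - i)).foldl
              (fun r j => r + (pvPairs (pvPS A (A.getD 0 []).length i j) : Int)) res
            = (List.range' (i+1) (A.length - i)).foldl (fun r _ => r) res := by
              apply PySem.List.foldl_congr_mem
              intro r j _
              rw [hps j]
              simp
          _ = res := foldl_id_int res _
    have hr : (List.range A.length).foldl (fun res i =>
        (List.range' (i+1) (A.length - i)).foldl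
          (fun r j => r + (pvPairs (pvPS A (A.getD 0 []).length i j) : Int)) res) 0 = 0 := by
      calc _ = (List.range A.length).foldl (fun (res : Int) _ => res) 0 := by
              apply PySem.List.foldl_congr_mem
              intro res i _
              exact hz res i
        _ = 0 := foldl_id_int 0 _
    rw [hr]
    show (if A.length = 0 ∨ (A.getD 0 []).length = 0 then (0:Int) else _) = 0
    rw [if_pos h0]
  · show (if A.length = 0 ∨ (A.getD 0 []).length = 0 then (0:Int) else
      (List.range A.length).foldl (fun res i =>
        (List.range' (i+1) (A.length - i)).foldl
          (pvStepA ((List.range' 1 A.length).foldl (fun m i =>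
              (List.range' 1 (A.getD 0 []).length).foldl (fun m' j =>
                pvSet2 m' i j (pvGetA A (i-1) (j-1) + pvGet2 m' (i-1) j + pvGet2 m' i (j-1)
                                - pvGet2 m' (i-1) (j-1))) m)
            (List.replicate (A.length+1) (List.replicate ((A.getD 0 []).length+1) (0:Int))))
            (A.getD 0 []).length i) res) 0)
      = _
    rw [if_neg h0, sm_eq A A.length (A.getD 0 []).length]
    apply PySem.List.foldl_congr_mem
    intro res i hi
    have hi' : i < A.length := List.mem_range.mp hi
    calc (List.range' (i+1) (A.length - i)).foldl
          (pvStepA ((List.range (A.length+1)).map (pvPrefRow A (A.getD 0 []).length))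
            (A.getD 0 []).length i) res
        = (List.range' (i+1) (A.length - i)).foldl (pvStepP A (A.getD 0 []).length i) res := by
          apply PySem.List.foldl_congr_mem
          intro r j hj
          have hj' := List.mem_range'_1.mp hj
          exact stepA_eq_stepP A A.length (A.getD 0 []).length i (by omega) (by omega) r
      _ = _ := by
          apply PySem.List.foldl_congr_mem
          intro r j _
          exact stepP_pairs A (A.getD 0 []).length i r j

-- ===== VERDICT (by name: the statement is the Claim_ definition above) =====
theorem solve_spec : Claim_equal_solve := by
  intro A _ _
  unfold Spec_solve
  exact solve_eq_alt A
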